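-- pv_equiv track=rewrite | github.com/thepratholic/Competitive-Programming | LeetCode/Weekly Contest 460/Maximum Number of Subsequences After One Inserting.py | numOfSubsequences
-- ===== SOURCE A (Python) =====
-- def numOfSubsequences(s: str) -> int:
--     n = len(s)
--     prefix_l, suffix_t = [0] * n, [0] * n
--
--     prefix_l[0] = 1 if s[0] == 'L' else 0
--     for i in range(1, n):
--         prefix_l[i] += prefix_l[i - 1]
--         if s[i] == 'L':
--             prefix_l[i] += 1
--
--     suffix_t[n - 1] = 1 if s[n - 1] == 'T' else 0
--     for i in range(n - 2, -1, -1):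
--         suffix_t[i] += suffix_t[i + 1]
--         if s[i] == 'T':
--             suffix_t[i] += 1
--
--     ans, best, ansl, anst = 0, 0, 0, 0
--
--     for i in range(n):
--         p = prefix_l[i - 1] if i > 0 else 0
--         suf = suffix_t[i + 1] if i + 1 < n else 0
--
--         if s[i] == 'C':
--             ans += p * suf
--             ansl += (p + 1) * suf
--             anst += p * (suf + 1)
--
--         p = prefix_l[i]
--         best = max(best, p * suf)
--
--     return max(ans + best, ansl, anst)
-- ===== SOURCE B (Python) =====
-- def numOfSubsequences(s: str) -> int:
--     # One pass with scalar counters: base LCT count plus the best of three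
--     # marginal insertion gains (insert 'L' front / 'T' back / 'C' anywhere).
--     total_t = s.count('T')
--     base = gain_l = gain_t = gain_c = 0
--     seen_l = seen_t = 0
--     for ch in s:
--         if ch == 'T':
--             seen_t += 1
--         suf = total_t - seen_t          # number of 'T' strictly after this position
--         if ch == 'C':
--             base += seen_l * suf
--             gain_l += suf               # extra pairs if one 'L' is prepended
--             gain_t += seen_l            # extra pairs if one 'T' is appended
--         if ch == 'L':
--             seen_l += 1
--         gain_c = max(gain_c, seen_l * suf)  # best single 'C' insertion point
--     return base + max(gain_c, gain_l, gain_t)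
-- ===== Notes on version B (the rewrite author's own statement) =====
-- stated objective: simpler
-- what changed: Replaces the two prefix/suffix arrays and three index loops by a single forward pass over the characters with scalar running counters, accumulating the base LCT count and three marginal insertion gains and returning base + max(gains).
import Mathlib
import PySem

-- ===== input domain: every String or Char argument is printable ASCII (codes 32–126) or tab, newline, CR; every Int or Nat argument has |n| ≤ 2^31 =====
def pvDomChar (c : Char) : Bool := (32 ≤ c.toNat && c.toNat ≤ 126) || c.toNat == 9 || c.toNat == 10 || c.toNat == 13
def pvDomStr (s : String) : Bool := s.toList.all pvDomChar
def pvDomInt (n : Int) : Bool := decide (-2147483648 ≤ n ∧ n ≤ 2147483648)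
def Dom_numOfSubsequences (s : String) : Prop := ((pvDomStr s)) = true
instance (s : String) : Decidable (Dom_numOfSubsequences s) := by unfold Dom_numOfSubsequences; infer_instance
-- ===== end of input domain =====

-- B replaces A's two prefix/suffix arrays and three loops by one forward pass with
-- scalar counters (base count + max of three marginal insertion gains); objective: simpler.


-- ===== PORT A =====
-- prefix_l array: prefix_l[i] = prefix_l[i-1] + (1 if s[i]=='L'), built front to back
def pvPrefL : List Char → Int → List Int
  | [], _ => []
  | c :: rest, acc =>
      let acc' := acc + (if c = 'L' then 1 else 0)
      acc' :: pvPrefL rest acc'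

-- suffix_t array: suffix_t[i] = suffix_t[i+1] + (1 if s[i]=='T'), built back to front
def pvSufT : List Char → List Int
  | [] => []
  | c :: rest =>
      let r := pvSufT rest
      ((if c = 'T' then 1 else 0) + r.headD 0) :: r

def numOfSubsequences (s : String) : Int :=
  let l := s.toList
  let n := l.length
  let pl := pvPrefL l 0
  let st := pvSufT l
  -- all indexing below is in range for i ∈ range n, so getD with default 0 is exact
  let res := (List.range n).foldl (fun (state : Int × Int × Int × Int) i =>
      let ans := state.1; let best := state.2.1; let ansl := state.2.2.1; let anst := state.2.2.2
      let p := if 0 < i then pl.getD (i - 1) 0 else 0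
      let suf := if i + 1 < n then st.getD (i + 1) 0 else 0
      let t := if l.getD i ' ' = 'C' then
                 (ans + p * suf, ansl + (p + 1) * suf, anst + p * (suf + 1))
               else (ans, ansl, anst)
      let p2 := pl.getD i 0
      (t.1, max best (p2 * suf), t.2.1, t.2.2)) (0, 0, 0, 0)
  max (res.1 + res.2.1) (max res.2.2.1 res.2.2.2)

-- ===== PORT B =====
def pvLoopB (totT : Int) : List Char → Int → Int → Int × Int × Int × Int → Int × Int × Int × Int
  | [], _, _, st => st
  | c :: rest, seenL, seenT, (base, gL, gT, gC) =>
      let seenT' := if c = 'T' then seenT + 1 else seenT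
      let suf := totT - seenT'
      let t := if c = 'C' then (base + seenL * suf, gL + suf, gT + seenL) else (base, gL, gT)
      let seenL' := if c = 'L' then seenL + 1 else seenL
      pvLoopB totT rest seenL' seenT' (t.1, t.2.1, t.2.2, max gC (seenL' * suf))

def numOfSubsequences_alt (s : String) : Int :=
  -- s.count('T') for a single-character argument equals the character count (exact)
  let totT : Int := (s.toList.count 'T' : Nat)
  let r := pvLoopB totT s.toList 0 0 (0, 0, 0, 0)
  r.1 + max r.2.2.2 (max r.2.1 r.2.2.1)

-- ===== PRECONDITION & SPEC =====
-- Pre_ excludes only the empty string, on which Python A raises IndexError at s[0].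
def Pre_numOfSubsequences (s : String) : Prop := s ≠ ""
instance (s : String) : Decidable (Pre_numOfSubsequences s) := by unfold Pre_numOfSubsequences; infer_instance
def pvWitness_numOfSubsequences : String := "LCT"

def Spec_numOfSubsequences (s : String) (out : Int) : Prop := out = numOfSubsequences_alt s
instance (s : String) (out : Int) : Decidable (Spec_numOfSubsequences s out) := by unfold Spec_numOfSubsequences; infer_instance

-- ===== CLAIM (what is proved, stated in full; the proofs are below) =====
def Claim_equal_numOfSubsequences : Prop := ∀ (s : String), Dom_numOfSubsequences s → Pre_numOfSubsequences s → Spec_numOfSubsequences s (numOfSubsequences s)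

-- ===== LEMMAS AND PROOFS =====

-- character count as Int (closed form used by both sides of the proof)
def pvCnt (ch : Char) : List Char → Int
  | [] => 0
  | c :: r => (if c = ch then 1 else 0) + pvCnt ch r

theorem pvCnt_eq_count (ch : Char) (l : List Char) : pvCnt ch l = (l.count ch : Nat) := by
  induction l with
  | nil => simp [pvCnt]
  | cons c r ih =>
      by_cases h : c = ch
      · simp [pvCnt, ih, h]
        ring
      · simp [pvCnt, ih, h]

theorem pvSufT_headD (l : List Char) : (pvSufT l).headD 0 = pvCnt 'T' l := by
  induction l with
  | nil => simp [pvSufT, pvCnt]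
  | cons c r ih => simp only [pvSufT, List.headD_cons, pvCnt, ih]

theorem pvSufT_getD (l : List Char) (i : ℕ) : (pvSufT l).getD i 0 = pvCnt 'T' (l.drop i) := by
  induction l generalizing i with
  | nil => simp [pvSufT, pvCnt]
  | cons c r ih =>
      cases i with
      | zero => simp only [pvSufT, List.getD_cons_zero, List.drop_zero, pvCnt, pvSufT_headD]
      | succ j => simpa [pvSufT] using ih j

theorem pvPrefL_getD (l : List Char) (acc : Int) (i : ℕ) (h : i < l.length) :
    (pvPrefL l acc).getD i 0 = acc + pvCnt 'L' (l.take (i + 1)) := by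
  induction l generalizing acc i with
  | nil => simp at h
  | cons c r ih =>
      cases i with
      | zero => simp [pvPrefL, pvCnt]
      | succ j =>
          have hj : j < r.length := by simpa using h
          have := ih (acc + if c = 'L' then 1 else 0) j hj
          simp only [pvPrefL, List.take_succ_cons, pvCnt, List.getD_cons_succ, this]
          ring

-- the closed-form step function A's range-fold is congruent to
def pvStepC (l : List Char) (seenL : Int) (state : Int × Int × Int × Int) (i : ℕ) : Int × Int × Int × Int :=
  let ans := state.1; let best := state.2.1; let ansl := state.2.2.1; let anst := state.2.2.2
  let p := seenL + pvCnt 'L' (l.take i)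
  let suf := pvCnt 'T' (l.drop (i + 1))
  let t := if l.getD i ' ' = 'C' then
             (ans + p * suf, ansl + (p + 1) * suf, anst + p * (suf + 1))
           else (ans, ansl, anst)
  let p2 := seenL + pvCnt 'L' (l.take (i + 1))
  (t.1, max best (p2 * suf), t.2.1, t.2.2)

-- structural form of A's main loop
def pvLoopA : List Char → Int → Int × Int × Int × Int → Int × Int × Int × Int
  | [], _, st => st
  | c :: rest, seenL, (ans, best, ansl, anst) =>
      let suf := pvCnt 'T' rest
      let t := if c = 'C' then
                 (ans + seenL * suf, ansl + (seenL + 1) * suf, anst + seenL * (suf + 1))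
               else (ans, ansl, anst)
      let seenL' := seenL + (if c = 'L' then 1 else 0)
      pvLoopA rest seenL' (t.1, max best (seenL' * suf), t.2.1, t.2.2)

theorem foldl_stepC_eq_loopA (l : List Char) :
    ∀ (seenL : Int) (st : Int × Int × Int × Int),
      (List.range l.length).foldl (pvStepC l seenL) st = pvLoopA l seenL st := by
  induction l with
  | nil => intro seenL st; simp [pvLoopA]
  | cons c rest ih =>
      intro seenL st
      obtain ⟨ans, best, ansl, anst⟩ := st
      have hadd : ∀ ys, seenL + pvCnt 'L' (c :: ys)
          = (seenL + (if c = 'L' then 1 else 0)) + pvCnt 'L' ys := by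
        intro ys; simp only [pvCnt]; ring
      have hstep : ∀ (acc : Int × Int × Int × Int) (i : ℕ),
          pvStepC (c :: rest) seenL acc (i + 1)
            = pvStepC rest (seenL + (if c = 'L' then 1 else 0)) acc i := by
        intro acc i
        simp only [pvStepC, List.take_succ_cons, List.drop_succ_cons, List.getD_cons_succ, hadd]
      have hlen : (c :: rest).length = rest.length + 1 := rfl
      rw [hlen, List.range_succ_eq_map, List.foldl_cons, List.foldl_map]
      have hcon := PySem.List.foldl_congr_mem (l := List.range rest.length)
        (fun acc y => pvStepC (c :: rest) seenL acc y.succ)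
        (pvStepC rest (seenL + (if c = 'L' then 1 else 0)))
        (pvStepC (c :: rest) seenL (ans, best, ansl, anst) 0)
        (by intro acc x _; exact hstep acc x)
      rw [hcon, ih]
      simp only [pvLoopA]
      congr 1
      simp only [pvStepC, List.getD_cons_zero, List.take_zero, List.take_succ_cons,
        List.drop_succ_cons, List.drop_zero, pvCnt, add_zero, Nat.zero_add]

-- A's range-fold with the arrays equals the fold with the closed-form step
theorem foldl_arrays_eq_stepC (l : List Char) :
    (List.range l.length).foldl (fun (state : Int × Int × Int × Int) i =>
      let ans := state.1; let best := state.2.1; let ansl := state.2.2.1; let anst := state.2.2.2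
      let p := if 0 < i then (pvPrefL l 0).getD (i - 1) 0 else 0
      let suf := if i + 1 < l.length then (pvSufT l).getD (i + 1) 0 else 0
      let t := if l.getD i ' ' = 'C' then
                 (ans + p * suf, ansl + (p + 1) * suf, anst + p * (suf + 1))
               else (ans, ansl, anst)
      let p2 := (pvPrefL l 0).getD i 0
      (t.1, max best (p2 * suf), t.2.1, t.2.2)) (0, 0, 0, 0)
    = (List.range l.length).foldl (pvStepC l 0) (0, 0, 0, 0) := by
  apply PySem.List.foldl_congr_mem
  intro st i hi
  have hi' : i < l.length := List.mem_range.mp hi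
  have hp : (if 0 < i then (pvPrefL l 0).getD (i - 1) 0 else 0) = 0 + pvCnt 'L' (l.take i) := by
    cases i with
    | zero => simp [pvCnt]
    | succ j =>
        have hj : j < l.length := Nat.lt_of_succ_lt hi'
        rw [if_pos (Nat.succ_pos j), Nat.add_sub_cancel, pvPrefL_getD l 0 j hj]
  have hsuf : (if i + 1 < l.length then (pvSufT l).getD (i + 1) 0 else 0)
      = pvCnt 'T' (l.drop (i + 1)) := by
    by_cases h : i + 1 < l.length
    · rw [if_pos h, pvSufT_getD]
    · have hd : l.drop (i + 1) = [] := List.drop_eq_nil_of_le (by omega)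
      simp [h, hd, pvCnt]
  have hp2 : (pvPrefL l 0).getD i 0 = 0 + pvCnt 'L' (l.take (i + 1)) := pvPrefL_getD l 0 i hi'
  simp only [pvStepC, hp, hsuf, hp2]

-- B's pass tracks A's loop under the state translation
--   (base, gL, gT, gC) ↦ (ans, best, ansl, anst) = (base, gC, base + gL, base + gT)
theorem loopA_eq_loopB (l : List Char) :
    ∀ (totT seenL seenT base gL gT gC : Int), totT = seenT + pvCnt 'T' l →
      pvLoopA l seenL (base, gC, base + gL, base + gT)
        = ((pvLoopB totT l seenL seenT (base, gL, gT, gC)).1,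
           (pvLoopB totT l seenL seenT (base, gL, gT, gC)).2.2.2,
           (pvLoopB totT l seenL seenT (base, gL, gT, gC)).1
             + (pvLoopB totT l seenL seenT (base, gL, gT, gC)).2.1,
           (pvLoopB totT l seenL seenT (base, gL, gT, gC)).1
             + (pvLoopB totT l seenL seenT (base, gL, gT, gC)).2.2.1) := by
  induction l with
  | nil => intro totT seenL seenT base gL gT gC h; simp [pvLoopA, pvLoopB]
  | cons c rest ih =>
      intro totT seenL seenT base gL gT gC h
      have hsuf : totT - (if c = 'T' then seenT + 1 else seenT) = pvCnt 'T' rest := by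
        by_cases hc : c = 'T' <;> simp [pvCnt, hc] at h ⊢ <;> omega
      have h' : totT = (if c = 'T' then seenT + 1 else seenT) + pvCnt 'T' rest := by omega
      simp only [pvLoopA, pvLoopB, hsuf]
      by_cases hC : c = 'C'
      · subst hC
        simp only [Char.reduceEq, reduceIte, add_zero]
        have h'' : totT = seenT + pvCnt 'T' rest := by simpa [pvCnt] using h
        have harg1 : (base + gL) + (seenL + 1) * pvCnt 'T' rest
            = (base + seenL * pvCnt 'T' rest) + (gL + pvCnt 'T' rest) := by ring
        have harg2 : (base + gT) + seenL * (pvCnt 'T' rest + 1)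
            = (base + seenL * pvCnt 'T' rest) + (gT + seenL) := by ring
        rw [harg1, harg2]
        exact ih totT seenL seenT (base + seenL * pvCnt 'T' rest) (gL + pvCnt 'T' rest)
          (gT + seenL) (max gC (seenL * pvCnt 'T' rest)) h''
      · by_cases hL : c = 'L'
        · subst hL
          simp only [Char.reduceEq, reduceIte]
          have h'' : totT = seenT + pvCnt 'T' rest := by simpa [pvCnt] using h
          exact ih totT (seenL + 1) seenT base gL gT (max gC ((seenL + 1) * pvCnt 'T' rest)) h''
        · by_cases hT : c = 'T'
          · subst hT
            simp only [Char.reduceEq, reduceIte, add_zero]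
            have h'' : totT = (seenT + 1) + pvCnt 'T' rest := by
              simp only [pvCnt, reduceIte] at h
              omega
            exact ih totT seenL (seenT + 1) base gL gT (max gC (seenL * pvCnt 'T' rest)) h''
          · simp only [hC, hL, hT, if_false, add_zero]
            have h'' : totT = seenT + pvCnt 'T' rest := by simpa [pvCnt, hT] using h
            exact ih totT seenL seenT base gL gT (max gC (seenL * pvCnt 'T' rest)) h''

-- ===== VERDICT (by name: the statement is the Claim_ definition above) =====
theorem numOfSubsequences_spec : Claim_equal_numOfSubsequences := by
  intro s _ _
  show numOfSubsequences s = numOfSubsequences_alt s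
  simp only [numOfSubsequences, numOfSubsequences_alt]
  rw [foldl_arrays_eq_stepC, foldl_stepC_eq_loopA]
  have h := loopA_eq_loopB s.toList ((s.toList.count 'T' : Nat)) 0 0 0 0 0 0
    (by rw [pvCnt_eq_count]; ring)
  norm_num at h
  rw [h]
  simp only [max_add_add_left]
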